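-- pv_equiv track=rewrite | github.com/ssb3204/python_training | 251104/2개 이상의 알파벳/more-than-one-alphabet.py | f
-- ===== SOURCE A (Python) =====
-- def f(a):
--     is_t=False
--     for i in range(len(a)-2):
--         for j in range(i+1,len(a)):
--             if a[i]!=a[j]:
--                 is_t=True
--     if is_t:
--         return True
--     else:
--         return False
-- ===== SOURCE B (Python) =====
-- def f(a):
--     # single pass: some character differs from the first one
--     # (empty iterable: the generator never evaluates a[0], so any() is False)
--     return any(c != a[0] for c in a)
-- ===== Notes on version B (the rewrite author's own statement) =====
-- stated objective: simpler
-- what changed: Replaces the all-pairs nested index loops with a single pass comparing every character to the first one, and drops the off-by-one loop bound that made two-character strings always False.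
-- intended difference: On two-character strings whose two characters differ, A's loop bound range(len(a)-2) skips the only index pair and A returns False; B returns True, which is the intended answer since such a string does contain two different characters. — e.g. on f("ab"): A returns false, B returns true
import Mathlib
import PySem

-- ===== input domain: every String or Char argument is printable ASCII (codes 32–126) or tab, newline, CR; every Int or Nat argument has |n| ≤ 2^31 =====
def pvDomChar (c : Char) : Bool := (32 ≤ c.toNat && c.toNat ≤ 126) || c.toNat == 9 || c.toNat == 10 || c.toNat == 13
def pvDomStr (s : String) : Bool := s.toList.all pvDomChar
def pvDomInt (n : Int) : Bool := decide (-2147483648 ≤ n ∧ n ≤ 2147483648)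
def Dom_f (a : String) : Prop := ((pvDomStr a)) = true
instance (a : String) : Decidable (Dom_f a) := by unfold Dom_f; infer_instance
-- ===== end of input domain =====

-- B replaces A's all-pairs nested loops by one pass comparing each character with the first;
-- the equivalence is stated outside D_f, where A's off-by-one loop bound changes the answer.

-- ===== PORT A =====
-- Indices produced by the two ranges are always in range, so pyGet? returns `some`;
-- comparing the Option values is exact there.
def f (a : String) : Bool :=
  let l := a.toList
  let is_t :=
    (PySem.List.pyRange 0 ((l.length : Int) - 2) 1).foldl (fun s i =>
      (PySem.List.pyRange (i + 1) (l.length : Int) 1).foldl (fun s2 j =>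
        if PySem.List.pyGet? l i ≠ PySem.List.pyGet? l j then true else s2) s) false
  if is_t then true else false

-- ===== PORT B =====
def f_alt (a : String) : Bool :=
  let l := a.toList
  l.any (fun c => some c != PySem.List.pyGet? l 0)

-- ===== PRECONDITION & SPEC =====
-- On two-character strings with two distinct characters A's loop bound range(len(a)-2)
-- skips the only pair and A returns False; B returns True, the intended answer.
def D_f (a : String) : Prop :=
  a.toList.length = 2 ∧ a.toList.getD 0 ' ' ≠ a.toList.getD 1 ' '
instance (a : String) : Decidable (D_f a) := by unfold D_f; infer_instance

def Spec_f (a : String) (out : Bool) : Prop := ¬ D_f a → out = f_alt a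
instance (a : String) (out : Bool) : Decidable (Spec_f a out) := by unfold Spec_f; infer_instance

def pvDiffWitness_f : String := "ab"
def pvDiffWitnessOut_f : Bool × Bool := (false, true)

-- ===== CLAIM (what is proved, stated in full; the proofs are below) =====
def Claim_unchanged_f : Prop := ∀ (a : String), Dom_f a → Spec_f a (f a)
def Claim_changed_f : Prop := Dom_f (pvDiffWitness_f) ∧ D_f (pvDiffWitness_f) ∧ f (pvDiffWitness_f) = pvDiffWitnessOut_f.1 ∧ f_alt (pvDiffWitness_f) = pvDiffWitnessOut_f.2 ∧ pvDiffWitnessOut_f.1 ≠ pvDiffWitnessOut_f.2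
def Claim_exact_f : Prop := ∀ (a : String), Dom_f a → D_f a → f a ≠ f_alt a

-- ===== LEMMAS AND PROOFS =====

-- a fold that only ever sets the flag computes `s || any p`
theorem foldl_or_eq_any {α : Type} (L : List α) (g : α → Bool) (s : Bool) :
    L.foldl (fun s x => (s || g x)) s = (s || L.any g) := by
  induction L generalizing s with
  | nil => simp
  | cons x xs ih => simp [List.foldl_cons, ih, Bool.or_assoc]

theorem foldl_if_true_eq_or_any {α : Type} (L : List α) (p : α → Bool) (s : Bool) :
    L.foldl (fun s x => if p x then true else s) s = (s || L.any p) := by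
  have h : (fun (s : Bool) (x : α) => if p x then true else s)
      = fun (s : Bool) (x : α) => (s || p x) := by
    funext s x; cases h : p x <;> simp [h]
  rw [h, foldl_or_eq_any]

theorem nested_eq_any (l : List Char) :
    (PySem.List.pyRange 0 ((l.length : Int) - 2) 1).foldl (fun s i =>
      (PySem.List.pyRange (i + 1) (l.length : Int) 1).foldl (fun s2 j =>
        if PySem.List.pyGet? l i ≠ PySem.List.pyGet? l j then true else s2) s) false
    = (PySem.List.pyRange 0 ((l.length : Int) - 2) 1).any (fun i =>
        (PySem.List.pyRange (i + 1) (l.length : Int) 1).any (fun j =>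
          decide (PySem.List.pyGet? l i ≠ PySem.List.pyGet? l j))) := by
  have h : (fun (s : Bool) (i : Int) =>
      (PySem.List.pyRange (i + 1) (l.length : Int) 1).foldl (fun s2 j =>
        if PySem.List.pyGet? l i ≠ PySem.List.pyGet? l j then true else s2) s)
    = fun (s : Bool) (i : Int) =>
        (s || (PySem.List.pyRange (i + 1) (l.length : Int) 1).any (fun j =>
          decide (PySem.List.pyGet? l i ≠ PySem.List.pyGet? l j))) := by
    funext s i
    simpa using foldl_if_true_eq_or_any
      (PySem.List.pyRange (i + 1) (l.length : Int) 1)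
      (fun j => decide (PySem.List.pyGet? l i ≠ PySem.List.pyGet? l j)) s
  rw [h, foldl_or_eq_any]
  simp

theorem f_eq_any (a : String) :
    f a = (PySem.List.pyRange 0 ((a.toList.length : Int) - 2) 1).any (fun i =>
      (PySem.List.pyRange (i + 1) (a.toList.length : Int) 1).any (fun j =>
        decide (PySem.List.pyGet? a.toList i ≠ PySem.List.pyGet? a.toList j))) := by
  simp only [f, nested_eq_any a.toList]
  split
  next h => exact h.symm
  next h => exact ((Bool.not_eq_true _).mp h).symm


-- the two characterizations agree outside D_f, stated on the underlying list
theorem key_lemma (l : List Char)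
    (hne : ¬(l.length = 2 ∧ l.getD 0 ' ' ≠ l.getD 1 ' ')) :
    (PySem.List.pyRange 0 ((l.length : Int) - 2) 1).any (fun i =>
      (PySem.List.pyRange (i + 1) (l.length : Int) 1).any (fun j =>
        decide (PySem.List.pyGet? l i ≠ PySem.List.pyGet? l j)))
    = l.any (fun c => some c != PySem.List.pyGet? l 0) := by
  by_cases h3 : 3 ≤ l.length
  · have h0n : 0 < l.length := by omega
    rw [Bool.eq_iff_iff]
    simp only [List.any_eq_true, PySem.List.mem_pyRange_one, bne_iff_ne,
      decide_eq_true_eq, PySem.List.pyGet?_zero, List.getElem?_eq_getElem h0n]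
    constructor
    · rintro ⟨i, ⟨hi0, hi2⟩, j, ⟨hj1, hjn⟩, hpq⟩
      have hiL : i < (l.length : Int) := by omega
      have hj0 : 0 ≤ j := by omega
      rw [PySem.List.pyGet?_eq_some_getElem l hi0 hiL,
          PySem.List.pyGet?_eq_some_getElem l hj0 hjn] at hpq
      have hgn : l[i.toNat] ≠ l[j.toNat] := fun h => hpq (by rw [h])
      by_cases hc : l[i.toNat] = l[0]
      · exact ⟨l[j.toNat], List.getElem_mem _,
          fun h => hgn (hc.trans (Option.some.inj h).symm)⟩
      · exact ⟨l[i.toNat], List.getElem_mem _, fun h => hc (Option.some.inj h)⟩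
    · rintro ⟨c, hc, hcne⟩
      obtain ⟨k, hk, rfl⟩ := List.mem_iff_getElem.mp hc
      have hk0 : k ≠ 0 := fun h => hcne (by subst h; rfl)
      refine ⟨0, ⟨le_refl _, by omega⟩, (k : Int), ⟨by omega, by exact_mod_cast hk⟩, ?_⟩
      rw [PySem.List.pyGet?_eq_some_getElem l (le_refl _) (by omega),
          PySem.List.pyGet?_eq_some_getElem l (by omega) (by exact_mod_cast hk)]
      intro h
      have h2 : l[(0 : Int).toNat] = l[(k : Int).toNat] := Option.some.inj h
      simp only [Int.toNat_zero, Int.toNat_natCast] at h2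
      exact hcne (congrArg some h2.symm)
  · have hnil : PySem.List.pyRange 0 ((l.length : Int) - 2) 1 = [] :=
      PySem.List.pyRange_one_eq_nil (by omega)
    rw [hnil]
    match l, hne, h3 with
    | [], _, _ => simp
    | [c], _, _ => simp
    | [c, d], hne, _ =>
      have hcd : c = d := by
        by_contra hcd
        exact hne ⟨rfl, by simpa using hcd⟩
      subst hcd
      simp
    | c :: d :: e :: rest, _, h3 => exact absurd (by simp) h3

-- B's port with its let unfolded
theorem f_alt_eq (a : String) :
    f_alt a = a.toList.any (fun c => some c != PySem.List.pyGet? a.toList 0) := rfl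

-- ===== VERDICT (by name: the statement is the Claim_ definition above) =====
theorem f_spec : Claim_unchanged_f := by
  intro a _ hD
  simp only [D_f] at hD
  show f a = f_alt a
  rw [f_eq_any, f_alt_eq]
  exact key_lemma a.toList hD

theorem f_changed : Claim_changed_f := by
  unfold Claim_changed_f; decide

theorem f_tight : Claim_exact_f := by
  intro a _ hD
  obtain ⟨hlen, hne⟩ := hD
  rw [f_eq_any, f_alt_eq]
  have hnil : PySem.List.pyRange 0 ((a.toList.length : Int) - 2) 1 = [] :=
    PySem.List.pyRange_one_eq_nil (by omega)
  rw [hnil]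
  match hl : a.toList, hlen with
  | [c, d], _ =>
    rw [hl] at hne
    have hcd : c ≠ d := by simpa using hne
    simp
    exact fun h => hcd h.symm
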